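-- pv_equiv track=rewrite | github.com/KarahanS/Cross-Time-Self-Distillation | data/VidOR/build_dataset.py | has_common_track
-- ===== SOURCE A (Python) =====
-- from typing import Dict, List, Set, Tuple, Iterable, Optional
--
-- def has_common_track(tracks: Dict[int, Set[int]], frames: List[int]) -> bool:
--     """True iff there is at least one track-id visible in *all* frames."""
--     common: Set[int] | None = None
--     for f in frames:
--         tids = tracks.get(f, set())
--         common = tids if common is None else common & tids
--         if not common:
--             return False
--     return True
-- ===== SOURCE B (Python) =====
-- def has_common_track(tracks, frames):
--     """True iff there is at least one track-id visible in *all* frames."""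
--     if not frames:
--         return True
--     for tid in tracks.get(frames[0], set()):
--         if all(tid in tracks.get(f, set()) for f in frames):
--             return True
--     return False
-- ===== Notes on version B (the rewrite author's own statement) =====
-- stated objective: alternative
-- what changed: Replaces the running set-intersection fold with early exit by a generate-and-verify scan: each candidate id from the first frame's set is checked for membership in every frame's set.
import Mathlib
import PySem

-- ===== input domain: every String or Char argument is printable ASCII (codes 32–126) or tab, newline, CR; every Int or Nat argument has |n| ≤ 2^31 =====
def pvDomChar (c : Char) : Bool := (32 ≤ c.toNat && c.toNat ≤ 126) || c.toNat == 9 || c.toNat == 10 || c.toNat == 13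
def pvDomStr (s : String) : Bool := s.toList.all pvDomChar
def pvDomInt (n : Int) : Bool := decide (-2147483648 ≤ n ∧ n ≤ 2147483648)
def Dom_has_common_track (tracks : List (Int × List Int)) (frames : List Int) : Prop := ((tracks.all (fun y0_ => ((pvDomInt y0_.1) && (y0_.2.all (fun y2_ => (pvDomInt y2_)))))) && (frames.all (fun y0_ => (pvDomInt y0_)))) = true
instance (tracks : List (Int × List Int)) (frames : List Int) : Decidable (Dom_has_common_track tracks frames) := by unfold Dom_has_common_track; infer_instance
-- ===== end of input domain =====

-- B replaces A's running set-intersection fold by a generate-and-verify scan over the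
-- first frame's candidate ids (alternative decomposition, same cost class).


-- ===== PORT A =====
-- the loop over frames, carrying `common : Option (List Int)` (None before the first frame);
-- `common & tids` is ported as a filter keeping the elements of common that lie in tids
def has_common_track_go (tracks : List (Int × List Int)) :
    Option (List Int) → List Int → Bool
  | _, [] => true
  | common, f :: rest =>
    let tids := PySem.Dict.getD (PySem.Dict.mk tracks) f []
    let common' := match common with
      | none => tids
      | some c => c.filter (fun t => tids.contains t)
    if common'.isEmpty then false else has_common_track_go tracks (some common') rest

def has_common_track (tracks : List (Int × List Int)) (frames : List Int) : Bool :=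
  has_common_track_go tracks none frames

-- ===== PORT B =====
def has_common_track_alt (tracks : List (Int × List Int)) (frames : List Int) : Bool :=
  match frames with
  | [] => true
  | f0 :: _ =>
    (PySem.Dict.getD (PySem.Dict.mk tracks) f0 []).any (fun tid =>
      frames.all (fun f => (PySem.Dict.getD (PySem.Dict.mk tracks) f []).contains tid))

-- ===== PRECONDITION & SPEC =====
def Spec_has_common_track (tracks : List (Int × List Int)) (frames : List Int) (out : Bool) : Prop := out = has_common_track_alt tracks frames
instance (tracks : List (Int × List Int)) (frames : List Int) (out : Bool) : Decidable (Spec_has_common_track tracks frames out) := by unfold Spec_has_common_track; infer_instance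

-- ===== CLAIM (what is proved, stated in full; the proofs are below) =====
def Claim_equal_has_common_track : Prop := ∀ (tracks : List (Int × List Int)) (frames : List Int), Dom_has_common_track tracks frames → Spec_has_common_track tracks frames (has_common_track tracks frames)

-- ===== LEMMAS AND PROOFS =====

-- invariant: on a nonempty carried set c, the loop returns true iff some element of c
-- is a member of every remaining frame's set
theorem has_common_track_go_some (tracks : List (Int × List Int)) (c : List Int)
    (rest : List Int) (hc : c ≠ []) :
    has_common_track_go tracks (some c) rest =
      c.any (fun t => rest.all (fun f => (PySem.Dict.getD (PySem.Dict.mk tracks) f []).contains t)) := by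
  induction rest generalizing c with
  | nil =>
    simp [has_common_track_go, List.any_eq_true]
    exact ⟨c.head hc, List.head_mem hc⟩
  | cons f rest ih =>
    simp only [has_common_track_go, List.all_cons]
    have hfilter : ∀ p : Int → Bool,
        c.any (fun t => (PySem.Dict.getD (PySem.Dict.mk tracks) f []).contains t && p t)
          = (c.filter (fun t => (PySem.Dict.getD (PySem.Dict.mk tracks) f []).contains t)).any p := by
      intro p
      simp [List.any_filter]
    by_cases h : (c.filter (fun t => (PySem.Dict.getD (PySem.Dict.mk tracks) f []).contains t)) = []
    · simp only [h, List.isEmpty_nil, if_true]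
      rw [hfilter, h]
      simp
    · rw [if_neg (by simpa [List.isEmpty_iff] using h)]
      rw [ih _ h, ← hfilter]

theorem has_common_track_eq (tracks : List (Int × List Int)) (frames : List Int) :
    has_common_track tracks frames = has_common_track_alt tracks frames := by
  cases frames with
  | nil => rfl
  | cons f0 rest =>
    simp only [has_common_track, has_common_track_go, has_common_track_alt]
    by_cases h : (PySem.Dict.getD (PySem.Dict.mk tracks) f0 []) = []
    · simp [h]
    · rw [if_neg (by simpa [List.isEmpty_iff] using h)]
      rw [has_common_track_go_some tracks (PySem.Dict.getD (PySem.Dict.mk tracks) f0 []) rest h]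
      simp only [List.all_cons]
      conv_rhs => rw [← List.any_filter]
      rw [List.filter_eq_self.mpr (fun a ha => by simp [ha])]

-- ===== VERDICT (by name: the statement is the Claim_ definition above) =====
theorem has_common_track_spec : Claim_equal_has_common_track := by
  intro tracks frames _
  unfold Spec_has_common_track
  exact has_common_track_eq tracks frames
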